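-- pv_equiv track=rewrite | github.com/bareckij/algs_labs | alg_lab6/task6/src/task6_6.py | process_fibonacci_check
-- ===== SOURCE A (Python) =====
-- import math
--
-- def is_fibonacci(n):
--     x = int(n)
--
--     def is_perfect_square(num):
--         s = int(math.isqrt(num))
--         return s * s == num
--
--     return is_perfect_square(5 * x * x + 4) or is_perfect_square(5 * x * x - 4)
--
-- def process_fibonacci_check(queries):
--     results = []
--     for query in queries:
--         if is_fibonacci(query):
--             results.append("Yes")
--         else:
--             results.append("No")
--     return results
-- ===== SOURCE B (Python) =====
-- def _is_fib(n):
--     a, b = 0, 1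
--     while a < n:
--         a, b = b, a + b
--     return a == n
--
-- def process_fibonacci_check(queries):
--     return ["Yes" if _is_fib(abs(query)) else "No" for query in queries]
-- ===== Notes on version B (the rewrite author's own statement) =====
-- stated objective: alternative
-- what changed: Replaces the 5x^2+-4 perfect-square (isqrt) identity test with direct generation of the Fibonacci sequence up to |query| and an equality check.
import Mathlib
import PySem

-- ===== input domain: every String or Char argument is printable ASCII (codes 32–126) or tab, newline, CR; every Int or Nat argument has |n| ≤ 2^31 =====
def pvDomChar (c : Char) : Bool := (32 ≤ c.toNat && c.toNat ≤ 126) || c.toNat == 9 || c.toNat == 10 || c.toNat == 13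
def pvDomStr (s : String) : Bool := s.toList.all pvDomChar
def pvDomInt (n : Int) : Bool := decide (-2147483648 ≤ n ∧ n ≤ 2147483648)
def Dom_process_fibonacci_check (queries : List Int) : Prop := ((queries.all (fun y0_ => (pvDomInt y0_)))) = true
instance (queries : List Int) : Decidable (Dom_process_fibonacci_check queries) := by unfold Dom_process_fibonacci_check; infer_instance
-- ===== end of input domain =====

-- B replaces A's 5x^2±4 perfect-square (isqrt) identity test by direct generation of the
-- Fibonacci sequence up to |query| and an equality check (alternative algorithm, same results).

-- ===== PORT A =====
-- math.isqrt(num) = Nat.sqrt num.toNat, exact for num ≥ 0 (A only evaluates it on num ≥ 0: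
-- the second disjunct is reached only when the first is false, hence only for x ≠ 0).
def pvIsPerfectSquare (num : Int) : Bool :=
  let s : Int := Int.ofNat (Nat.sqrt num.toNat)
  s * s == num

def pvIsFibonacci (n : Int) : Bool :=
  let x : Int := n
  pvIsPerfectSquare (5 * x * x + 4) || pvIsPerfectSquare (5 * x * x - 4)

def process_fibonacci_check (queries : List Int) : List String :=
  queries.foldl (fun results query =>
    results ++ [if pvIsFibonacci query then "Yes" else "No"]) []

-- ===== PORT B =====
-- the while-loop of Source B's _is_fib: a, b = 0, 1; while a < n: a, b = b, a + b; return a == n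
-- (the `b = 0` branch is a pure totality guard: b starts at 1 and only grows, so it is never taken)
def pvFibLoop (a b n : Nat) : Bool :=
  if h : a < n then
    if hb : b = 0 then false
    else pvFibLoop b (a + b) n
  else a == n
termination_by (n - a) + (n - b)
decreasing_by omega

def process_fibonacci_check_alt (queries : List Int) : List String :=
  queries.map (fun query => if pvFibLoop 0 1 query.natAbs then "Yes" else "No")

-- ===== PRECONDITION & SPEC =====
def Spec_process_fibonacci_check (queries : List Int) (out : List String) : Prop := out = process_fibonacci_check_alt queries
instance (queries : List Int) (out : List String) : Decidable (Spec_process_fibonacci_check queries out) := by unfold Spec_process_fibonacci_check; infer_instance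

-- ===== CLAIM (what is proved, stated in full; the proofs are below) =====
def Claim_equal_process_fibonacci_check : Prop := ∀ (queries : List Int), Dom_process_fibonacci_check queries → Spec_process_fibonacci_check queries (process_fibonacci_check queries)

-- ===== LEMMAS AND PROOFS =====

-- Lucas companion sequence, expressed through fib
def pvLuc (k : Nat) : Int := 2 * (Nat.fib (k + 1) : Int) - (Nat.fib k : Int)

theorem pvCassini (k : Nat) :
    ((Nat.fib (k + 1) : Int)) ^ 2 - (Nat.fib (k + 1) : Int) * (Nat.fib k : Int) - (Nat.fib k : Int) ^ 2 = (-1) ^ k := by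
  induction k with
  | zero => simp
  | succ k ih =>
    have h2 : ((Nat.fib (k + 2) : Int)) = (Nat.fib (k + 1) : Int) + (Nat.fib k : Int) := by
      have := Nat.fib_add_two (n := k); push_cast [this]; ring
    rw [show k + 1 + 1 = k + 2 from rfl, h2, pow_succ]
    linear_combination (-1 : Int) * ih

theorem pvLuc_sq (k : Nat) : (pvLuc k) ^ 2 - 5 * (Nat.fib k : Int) ^ 2 = 4 * (-1) ^ k := by
  unfold pvLuc; linear_combination 4 * pvCassini k

theorem pvLuc_nonneg (k : Nat) : 0 ≤ pvLuc k := by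
  unfold pvLuc
  have h := Nat.fib_le_fib_succ (n := k)
  push_cast
  omega

theorem pvRec_v (k : Nat) : pvLuc k + 3 * (Nat.fib k : Int) = 2 * (Nat.fib (k + 2) : Int) := by
  unfold pvLuc
  have h2 : ((Nat.fib (k + 2) : Int)) = (Nat.fib (k + 1) : Int) + (Nat.fib k : Int) := by
    have := Nat.fib_add_two (n := k); push_cast [this]; ring
  rw [h2]; ring

theorem pvRec_u (k : Nat) : 3 * pvLuc k + 5 * (Nat.fib k : Int) = 2 * pvLuc (k + 2) := by
  unfold pvLuc
  have h2 : ((Nat.fib (k + 2) : Int)) = (Nat.fib (k + 1) : Int) + (Nat.fib k : Int) := by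
    have := Nat.fib_add_two (n := k); push_cast [this]; ring
  have h3 : ((Nat.fib (k + 3) : Int)) = (Nat.fib (k + 1) : Int) + (Nat.fib (k + 2) : Int) := by
    have := Nat.fib_add_two (n := k + 1); push_cast [this]; ring
  rw [show k + 2 + 1 = k + 3 from rfl, h3, h2]; ring

-- Classification of the Pell-like solutions: u² - 5v² = ±4 with u ≥ 0 forces (v,u) = (fib k, luc k)
theorem pvPell : ∀ (v : Nat) (u : Int), 0 ≤ u →
    (u ^ 2 - 5 * (v : Int) ^ 2 = 4 ∨ u ^ 2 - 5 * (v : Int) ^ 2 = -4) →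
    ∃ k, Nat.fib k = v ∧ u = pvLuc k := by
  intro v
  induction v using Nat.strong_induction_on with
  | _ v ih =>
    intro u hu h
    by_cases hv0 : v = 0
    · subst hv0
      rcases h with h | h
      · norm_num at h
        have h2 : (u - 2) * (u + 2) = 0 := by linear_combination h
        have hL : pvLuc 0 = 2 := by decide
        rcases mul_eq_zero.mp h2 with h2 | h2
        · exact ⟨0, by simp, by omega⟩
        · omega
      · norm_num at h
        nlinarith [sq_nonneg u]
    · by_cases hv1 : v = 1
      · subst hv1
        rcases h with h | h
        · norm_num at h
          have h2 : (u - 3) * (u + 3) = 0 := by linear_combination h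
          have hL : pvLuc 2 = 3 := by decide
          have hf : Nat.fib 2 = 1 := by decide
          rcases mul_eq_zero.mp h2 with h2 | h2
          · exact ⟨2, hf, by omega⟩
          · omega
        · norm_num at h
          have h2 : (u - 1) * (u + 1) = 0 := by linear_combination h
          have hL : pvLuc 1 = 1 := by decide
          rcases mul_eq_zero.mp h2 with h2 | h2
          · exact ⟨1, by simp, by omega⟩
          · omega
      · -- v ≥ 2 : descend
        have hv2 : (2 : Int) ≤ (v : Int) := by
          have : 2 ≤ v := by omega
          exact_mod_cast this
        obtain ⟨c, hc4, hcEq⟩ : ∃ c : Int, (c = 4 ∨ c = -4) ∧ u ^ 2 - 5 * (v : Int) ^ 2 = c := by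
          rcases h with h | h
          · exact ⟨4, Or.inl rfl, h⟩
          · exact ⟨-4, Or.inr rfl, h⟩
        have hcb : -4 ≤ c ∧ c ≤ 4 := by rcases hc4 with h' | h' <;> omega
        have hvu : (v : Int) < u := by nlinarith
        have hu3v : u < 3 * (v : Int) := by nlinarith
        have h35 : 5 * (v : Int) ≤ 3 * u := by nlinarith
        -- parity: u ≡ v (mod 2)
        have hpar : (u - (v : Int)) % 2 = 0 := by
          obtain ⟨a, ha⟩ : ∃ a, u = 2 * a ∨ u = 2 * a + 1 := ⟨u / 2, by omega⟩
          obtain ⟨b, hb⟩ : ∃ b, (v : Int) = 2 * b ∨ (v : Int) = 2 * b + 1 := ⟨(v : Int) / 2, by omega⟩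
          rcases ha with ha | ha <;> rcases hb with hb | hb
          · omega
          · exfalso
            have h4 : 4 * (a ^ 2) - 20 * (b ^ 2) - 20 * b - 5 = c := by
              rw [ha, hb] at hcEq; linear_combination hcEq
            generalize a ^ 2 = A at h4
            generalize b ^ 2 = B at h4
            omega
          · exfalso
            have h4 : 4 * (a ^ 2) + 4 * a - 20 * (b ^ 2) + 1 = c := by
              rw [ha, hb] at hcEq; linear_combination hcEq
            generalize a ^ 2 = A at h4
            generalize b ^ 2 = B at h4
            omega
          · omega
        obtain ⟨d, hd⟩ : ∃ d, u = (v : Int) + 2 * d := ⟨(u - (v : Int)) / 2, by omega⟩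
        -- descended solution: u' = 3d - v, v' = v - d
        have hEq' : (3 * d - (v : Int)) ^ 2 - 5 * ((v : Int) - d) ^ 2 = c := by
          rw [hd] at hcEq; linear_combination hcEq
        have hd1 : 1 ≤ d := by omega
        have hdv : 3 * d ≥ (v : Int) := by omega
        have hvd1 : 1 ≤ (v : Int) - d := by omega
        have hlt : ((v : Int) - d).toNat < v := by omega
        have hcast : ((((v : Int) - d).toNat : Int)) = (v : Int) - d := Int.toNat_of_nonneg (by omega)
        have hsol : (3 * d - (v : Int)) ^ 2 - 5 * ((((v : Int) - d).toNat : Int)) ^ 2 = 4 ∨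
            (3 * d - (v : Int)) ^ 2 - 5 * ((((v : Int) - d).toNat : Int)) ^ 2 = -4 := by
          rw [hcast]
          rcases hc4 with h' | h'
          · left; omega
          · right; omega
        obtain ⟨k, hk1, hk2⟩ := ih (((v : Int) - d).toNat) hlt (3 * d - (v : Int)) (by omega) hsol
        have hfibk : (Nat.fib k : Int) = (v : Int) - d := by rw [hk1]; exact hcast
        refine ⟨k + 2, ?_, ?_⟩
        · have h2 : 2 * (Nat.fib (k + 2) : Int) = 2 * (v : Int) := by
            rw [← pvRec_v k, ← hk2, hfibk]; ring
          have : (Nat.fib (k + 2) : Int) = (v : Int) := by omega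
          exact_mod_cast this
        · have h2 : 2 * pvLuc (k + 2) = 2 * u := by
            rw [← pvRec_u k, ← hk2, hfibk, hd]; ring
          omega

-- characterization of A's perfect-square test
theorem pvIPS_iff (num : Int) :
    pvIsPerfectSquare num = true ↔ 0 ≤ num ∧ ∃ s : Nat, (s : Int) * (s : Int) = num := by
  unfold pvIsPerfectSquare
  simp only [Int.ofNat_eq_natCast, beq_iff_eq]
  constructor
  · intro h
    refine ⟨?_, ⟨Nat.sqrt num.toNat, h⟩⟩
    rw [← h]; positivity
  · rintro ⟨hn, s, hs⟩
    have hss : ((s * s : Nat) : Int) = num := by push_cast; exact hs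
    have ht : num.toNat = s * s := by omega
    rw [ht, Nat.sqrt_eq s]
    push_cast
    exact hs

-- A's test is true exactly when |x| is a Fibonacci number
theorem pvA_iff (x : Int) : pvIsFibonacci x = true ↔ ∃ k, Nat.fib k = x.natAbs := by
  have hxx : ((x.natAbs : Int)) * (x.natAbs : Int) = x * x := by
    have := Int.natAbs_mul_self (a := x); exact_mod_cast this
  unfold pvIsFibonacci
  simp only [Bool.or_eq_true]
  constructor
  · rintro (h | h)
    · obtain ⟨-, s, hs⟩ := (pvIPS_iff _).mp h
      obtain ⟨k, hk, -⟩ := pvPell x.natAbs (s : Int) (by positivity)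
        (Or.inl (by linear_combination hs - 5 * hxx))
      exact ⟨k, hk⟩
    · obtain ⟨-, s, hs⟩ := (pvIPS_iff _).mp h
      obtain ⟨k, hk, -⟩ := pvPell x.natAbs (s : Int) (by positivity)
        (Or.inr (by linear_combination hs - 5 * hxx))
      exact ⟨k, hk⟩
  · rintro ⟨k, hk⟩
    have hfib : (Nat.fib k : Int) * (Nat.fib k : Int) = x * x := by
      rw [hk]; exact hxx
    have hsq := pvLuc_sq k
    have hL := pvLuc_nonneg k
    rcases Nat.even_or_odd k with hpar | hpar
    · left
      rw [pvIPS_iff]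
      refine ⟨by nlinarith [mul_self_nonneg x], ⟨(pvLuc k).toNat, ?_⟩⟩
      have hc : ((pvLuc k).toNat : Int) = pvLuc k := Int.toNat_of_nonneg hL
      rw [hc]
      have : (-1 : Int) ^ k = 1 := hpar.neg_one_pow
      nlinarith [hsq, hfib, this]
    · right
      rw [pvIPS_iff]
      have : (-1 : Int) ^ k = -1 := hpar.neg_one_pow
      refine ⟨by nlinarith [hsq, hfib, this, sq_nonneg (pvLuc k)], ⟨(pvLuc k).toNat, ?_⟩⟩
      have hc : ((pvLuc k).toNat : Int) = pvLuc k := Int.toNat_of_nonneg hL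
      rw [hc]
      nlinarith [hsq, hfib, this]

-- B's loop, run from (fib i, fib (i+1)), decides Fibonacci-ness
theorem pvLoop_aux : ∀ (m i n : Nat),
    (n - Nat.fib i) + (n - Nat.fib (i + 1)) ≤ m →
    (∀ j, Nat.fib j = n → Nat.fib i ≤ n) →
    (pvFibLoop (Nat.fib i) (Nat.fib (i + 1)) n = true ↔ ∃ k, Nat.fib k = n) := by
  intro m
  induction m with
  | zero =>
    intro i n hm hH
    have hin : ¬ Nat.fib i < n := by omega
    rw [pvFibLoop, dif_neg hin]
    simp only [beq_iff_eq]
    constructor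
    · intro h; exact ⟨i, h⟩
    · rintro ⟨k, hk⟩
      have := hH k hk
      omega
  | succ m ihm =>
    intro i n hm hH
    by_cases hlt : Nat.fib i < n
    · have hb1 : 0 < Nat.fib (i + 1) := Nat.fib_pos.mpr (by omega)
      have hsum : Nat.fib i + Nat.fib (i + 1) = Nat.fib (i + 1 + 1) := (Nat.fib_add_two (n := i)).symm
      rw [pvFibLoop, dif_pos hlt, dif_neg (by omega), hsum]
      have h2 : Nat.fib (i + 1 + 1) = Nat.fib i + Nat.fib (i + 1) := Nat.fib_add_two (n := i)
      apply ihm (i + 1) n (by omega)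
      intro j hj
      have hij : i < j := by
        by_contra hcon
        have := Nat.fib_mono (Nat.le_of_not_lt hcon)
        omega
      have := Nat.fib_mono (show i + 1 ≤ j by omega)
      omega
    · rw [pvFibLoop, dif_neg hlt]
      simp only [beq_iff_eq]
      constructor
      · intro h; exact ⟨i, h⟩
      · rintro ⟨k, hk⟩
        have := hH k hk
        omega

theorem pvLoop_iff (n : Nat) : pvFibLoop 0 1 n = true ↔ ∃ k, Nat.fib k = n := by
  have e0 : Nat.fib 0 = 0 := by decide
  have e1 : Nat.fib 1 = 1 := by decide
  have h := pvLoop_aux (n + n) 0 n (by omega) (by intro j _; rw [e0]; exact Nat.zero_le n)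
  rw [e0, e1] at h
  exact h

theorem pvPointwise (x : Int) : pvIsFibonacci x = pvFibLoop 0 1 x.natAbs := by
  have hA := pvA_iff x
  have hB := pvLoop_iff x.natAbs
  cases ha : pvIsFibonacci x <;> cases hb : pvFibLoop 0 1 x.natAbs
  · rfl
  · exact absurd (hA.mpr (hB.mp hb)) (by simp [ha])
  · exact absurd (hB.mpr (hA.mp ha)) (by simp [hb])
  · rfl

theorem pvFoldA (qs : List Int) (acc : List String) :
    qs.foldl (fun results query => results ++ [if pvIsFibonacci query then "Yes" else "No"]) acc
      = acc ++ qs.map (fun query => if pvIsFibonacci query then "Yes" else "No") := by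
  induction qs generalizing acc with
  | nil => simp
  | cons q qs ih => simp [List.foldl, ih]

-- ===== VERDICT (by name: the statement is the Claim_ definition above) =====
theorem process_fibonacci_check_spec : Claim_equal_process_fibonacci_check := by
  intro queries _
  unfold Spec_process_fibonacci_check process_fibonacci_check process_fibonacci_check_alt
  rw [pvFoldA, List.nil_append]
  simp only [pvPointwise]
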